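-- pv_equiv track=rewrite | github.com/sraaphorst/Daily-Coding-Problem | dcp_py/day222/day222.py | simplify_pathname
-- ===== SOURCE A (Python) =====
-- def simplify_pathname(path_name: str) -> str:
--     """
--     Simplify an absolute pathname.
--     :param path_name: the pathname, which may contain . or ..
--     :return: the simplified pathname
--
--     >>> simplify_pathname('/')
--     '/'
--     >>> simplify_pathname('//////usr/bin/')
--     '/usr/bin/'
--     >>> simplify_pathname('/../../../../usr/bin')
--     '/usr/bin'
--     >>> simplify_pathname('/usr/bin/../bin/./scripts/../')
--     '/usr/bin/'
--     >>> simplify_pathname('/home/')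
--     '/home/'
--     """
--     # Collapse the /////... strings since they do nothing.
--     while '//' in path_name:
--         path_name = path_name.replace('//', '/')
--
--     pieces = path_name.split('/')
--     stack = []
--
--     for piece in pieces:
--         if piece == '..':
--             if len(stack) > 0:
--                 stack.pop()
--         elif piece != '.':
--             stack.append(piece)
--
--     # We need a leading '' to get the initial /.
--     if stack[0] != '':
--         stack.insert(0, '')
--     return '/'.join(stack)
-- ===== SOURCE B (Python) =====
-- def _resolve(pieces):
--     # Recursive right-to-left resolution.  Returns (kept, pending): the
--     # surviving components of `pieces` in order, and the number of '..'
--     # entries still waiting to cancel a component further to the left.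
--     if not pieces:
--         return [], 0
--     kept, pending = _resolve(pieces[1:])
--     head = pieces[0]
--     if head == '..':
--         return kept, pending + 1
--     if head == '.':
--         return kept, pending
--     if pending > 0:
--         return kept, pending - 1
--     return [head] + kept, 0
--
--
-- def simplify_pathname(path_name: str) -> str:
--     # Collapse the /////... strings since they do nothing.
--     while '//' in path_name:
--         path_name = path_name.replace('//', '/')
--
--     stack, _ = _resolve(path_name.split('/'))
--
--     # A leading '' piece already yields the initial '/'; otherwise prepend one.
--     prefix = '' if stack[0] == '' else '/'
--     return prefix + '/'.join(stack)
-- ===== Notes on version B (the rewrite author's own statement) =====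
-- stated objective: alternative
-- what changed: Component resolution is rewritten as a structural recursion that resolves the split pieces right-to-left, returning the surviving components together with a pending-'..' counter, instead of A's imperative left-to-right stack loop with conditional pops; the leading slash is produced by a conditional string prefix instead of A's list insert.
-- outside the precondition, e.g. on simplify_pathname('/..'): A raises IndexError, B raises IndexError; on simplify_pathname('..'): A raises IndexError, B raises IndexError
import Mathlib
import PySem

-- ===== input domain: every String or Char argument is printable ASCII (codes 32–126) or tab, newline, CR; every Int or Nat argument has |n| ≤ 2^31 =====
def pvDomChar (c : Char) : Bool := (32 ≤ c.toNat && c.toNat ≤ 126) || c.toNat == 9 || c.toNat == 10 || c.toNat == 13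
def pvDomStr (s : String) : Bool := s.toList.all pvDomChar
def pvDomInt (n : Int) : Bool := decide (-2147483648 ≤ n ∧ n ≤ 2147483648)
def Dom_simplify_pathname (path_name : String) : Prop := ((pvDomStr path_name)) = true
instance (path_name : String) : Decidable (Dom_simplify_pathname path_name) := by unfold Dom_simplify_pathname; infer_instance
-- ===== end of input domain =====

-- B resolves '.'/'..' by a structural recursion over the pieces (right-to-left, returning
-- survivors plus a pending-'..' counter) and prepends the leading '/' by string concatenation,
-- instead of A's left-to-right stack loop with pops and list insert (objective: alternative).
-- On inputs where every component is cancelled (e.g. '/..') both Pythons raise IndexError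
-- at stack[0]; Pre_ excludes exactly those inputs.


-- ===== PORT A =====
-- while '//' in path_name: path_name = path_name.replace('//', '/')
-- (shared verbatim by both Pythons; each iteration that runs replaces at least one '//'
--  by '/', shortening the string, so |path_name| iterations of fuel always suffice — exact)
def pvCollapse (fuel : Nat) (s : String) : String :=
  match fuel with
  | 0 => s
  | f + 1 =>
    if PySem.Str.isIn "//" s then pvCollapse f (PySem.Str.replace s "//" "/") else s

def simplify_pathname (path_name : String) : String :=
  let p := pvCollapse path_name.toList.length path_name
  let pieces := (PySem.Str.split? p "/").getD []   -- sep "/" ≠ "": split? is always some here — exact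
  let stack := pieces.foldl
    (fun (st : List String) piece =>
      if piece = ".." then (if st.length > 0 then st.dropLast else st)
      else if piece ≠ "." then st ++ [piece] else st) []
  match PySem.List.pyGet? stack 0 with
  | none => ""                          -- Python raises IndexError here; excluded by Pre_
  | some h =>
    let stack := if h ≠ "" then PySem.List.insert stack 0 "" else stack
    PySem.Str.join "/" stack

-- ===== PORT B =====
-- port of Source B's _resolve: structural recursion, survivors in order + pending '..' count
def pvResolve : List String → List String × Nat
  | [] => ([], 0)
  | head :: rest =>
    let r := pvResolve rest
    if head = ".." then (r.1, r.2 + 1)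
    else if head = "." then (r.1, r.2)
    else if r.2 > 0 then (r.1, r.2 - 1)
    else (head :: r.1, 0)

def simplify_pathname_alt (path_name : String) : String :=
  let p := pvCollapse path_name.toList.length path_name
  let stack := (pvResolve ((PySem.Str.split? p "/").getD [])).1   -- sep "/" ≠ "" — exact
  match PySem.List.pyGet? stack 0 with
  | none => ""                          -- Python raises IndexError at stack[0]; excluded by Pre_
  | some h =>
    let pre := if h = "" then "" else "/"
    -- Python's 'prefix + "/".join(stack)' — str concatenation, exact on the char lists
    String.ofList (pre.toList ++ (PySem.Str.join "/" stack).toList)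

-- ===== PRECONDITION & SPEC =====
def pvNormalPiece (p : String) : Bool := !(p == "..") && !(p == ".")

-- Pre_ excludes exactly the inputs on which the Python A (and B) raises IndexError at
-- stack[0] (e.g. '/..': every component is cancelled).  The condition itself is
-- closed-form counting, not a run of the resolution loop: some suffix of the
-- '/'-separated component list has more ordinary components than '..' entries —
-- exactly then a component survives.  The component list is necessarily the
-- normalised one (repeated slashes collapsed, then split on the slash), since empty
-- components produced by repeated slashes count as ordinary components for the crash behaviour.
def Pre_simplify_pathname (path_name : String) : Prop :=
  ∃ t ∈ ((PySem.Str.split? (pvCollapse path_name.toList.length path_name) "/").getD []).tails,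
    t.count ".." < t.countP pvNormalPiece

instance (path_name : String) : Decidable (Pre_simplify_pathname path_name) := by
  unfold Pre_simplify_pathname; infer_instance

def pvWitness_simplify_pathname : String := "/usr//bin/../"

def Spec_simplify_pathname (path_name : String) (out : String) : Prop :=
  out = simplify_pathname_alt path_name
instance (path_name : String) (out : String) : Decidable (Spec_simplify_pathname path_name out) := by
  unfold Spec_simplify_pathname; infer_instance

-- ===== CLAIM (what is proved, stated in full; the proofs are below) =====
def Claim_equal_simplify_pathname : Prop := ∀ (path_name : String), Dom_simplify_pathname path_name → Pre_simplify_pathname path_name → Spec_simplify_pathname path_name (simplify_pathname path_name)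

-- ===== LEMMAS AND PROOFS =====

-- A's loop step, named for the proofs
def pvStepA (st : List String) (piece : String) : List String :=
  if piece = ".." then (if st.length > 0 then st.dropLast else st)
  else if piece ≠ "." then st ++ [piece] else st

def pvDropK : Nat → List String → List String
  | 0, s => s
  | n + 1, s => pvDropK n s.dropLast

theorem pvDropK_nil (k : Nat) : pvDropK k [] = [] := by
  induction k with
  | zero => rfl
  | succ n ih => simpa [pvDropK] using ih

-- A's fold from any start state, in terms of B's recursion
theorem pvMain (ps : List String) : ∀ (s : List String),
    ps.foldl pvStepA s = pvDropK (pvResolve ps).2 s ++ (pvResolve ps).1 := by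
  induction ps with
  | nil => intro s; simp [pvResolve, pvDropK]
  | cons p r ih =>
    intro s
    by_cases h1 : p = ".."
    · have hA : pvStepA s p = s.dropLast := by
        by_cases hs : s = []
        · subst hs; simp [pvStepA, h1]
        · simp [pvStepA, h1, List.length_pos_iff.mpr hs]
      rw [List.foldl_cons, hA, ih]
      simp [pvResolve, h1, pvDropK]
    · by_cases h2 : p = "."
      · have hA : pvStepA s p = s := by simp [pvStepA, h2]
        rw [List.foldl_cons, hA, ih]
        simp [pvResolve, h2]
      · have hA : pvStepA s p = s ++ [p] := by simp [pvStepA, h1, h2]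
        rw [List.foldl_cons, hA, ih]
        by_cases hk : (pvResolve r).2 > 0
        · obtain ⟨k', hk'⟩ : ∃ k', (pvResolve r).2 = k' + 1 :=
            ⟨(pvResolve r).2 - 1, by omega⟩
          simp [pvResolve, h1, h2, hk', pvDropK]
        · have hk0 : (pvResolve r).2 = 0 := by omega
          simp [pvResolve, h1, h2, hk0, pvDropK]

-- suffix sum and max-suffix-sum invariants, to show Pre_ ⇒ surviving stack nonempty
def pvS (ps : List String) : Int :=
  (ps.countP pvNormalPiece : Int) - (ps.count ".." : Int)

def pvM : List String → Int
  | [] => 0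
  | p :: r => max (pvS (p :: r)) (pvM r)

theorem pvS_dd (r : List String) : pvS (".." :: r) = pvS r - 1 := by
  have hn : pvNormalPiece ".." = false := by decide
  simp [pvS, hn]
  ring

theorem pvS_dot (r : List String) : pvS ("." :: r) = pvS r := by
  have hn : pvNormalPiece "." = false := by decide
  simp [pvS, hn]

theorem pvS_norm (p : String) (r : List String) (h1 : p ≠ "..") (h2 : p ≠ ".") :
    pvS (p :: r) = pvS r + 1 := by
  have hn : pvNormalPiece p = true := by simp [pvNormalPiece, h1, h2]
  simp [pvS, hn, h1]
  ring

theorem pvInv (ps : List String) :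
    ((pvResolve ps).2 : Int) = pvM ps - pvS ps ∧ ((pvResolve ps).1.length : Int) = pvM ps := by
  induction ps with
  | nil => simp [pvResolve, pvM, pvS]
  | cons p r ih =>
    obtain ⟨ih1, ih2⟩ := ih
    have hk0 : 0 ≤ ((pvResolve r).2 : Int) := by positivity
    have hl0 : 0 ≤ ((pvResolve r).1.length : Int) := by positivity
    have hMcons : pvM (p :: r) = max (pvS (p :: r)) (pvM r) := rfl
    by_cases h1 : p = ".."
    · subst h1
      simp only [pvResolve, String.reduceEq, reduceIte]
      rw [hMcons, pvS_dd]
      constructor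
      · push_cast; omega
      · omega
    · by_cases h2 : p = "."
      · subst h2
        simp only [pvResolve, String.reduceEq, reduceIte]
        rw [hMcons, pvS_dot]
        constructor
        · omega
        · omega
      · simp only [pvResolve, if_neg h1, if_neg h2]
        rw [hMcons, pvS_norm p r h1 h2]
        by_cases hk : (pvResolve r).2 > 0
        · rw [if_pos hk]
          dsimp only
          have hkpos : (0 : Int) < ((pvResolve r).2 : Int) := by exact_mod_cast hk
          constructor
          · omega
          · omega
        · rw [if_neg hk]
          have hkz : ((pvResolve r).2 : Int) = 0 := by
            have : (pvResolve r).2 = 0 := by omega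
            simp [this]
          constructor
          · simp only []; omega
          · simp only [List.length_cons]; push_cast; omega

theorem pvS_le_pvM (ps : List String) : ∀ t, t <:+ ps → pvS t ≤ pvM ps := by
  induction ps with
  | nil => intro t ht; rw [List.suffix_nil.mp ht]; simp [pvS, pvM]
  | cons p r ih =>
    intro t ht
    rcases List.suffix_cons_iff.mp ht with h | h
    · subst h; exact le_max_left _ _
    · exact le_trans (ih t h) (le_max_right _ _)

theorem pvPre_stack_ne (ps : List String)
    (h : ∃ t ∈ ps.tails, t.count ".." < t.countP pvNormalPiece) :
    (pvResolve ps).1 ≠ [] := by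
  obtain ⟨t, ht, hlt⟩ := h
  have hsfx : t <:+ ps := (List.mem_tails t ps).mp ht
  have hS : 0 < pvS t := by simp only [pvS]; omega
  have hM : 0 < pvM ps := lt_of_lt_of_le hS (pvS_le_pvM ps t hsfx)
  have hlen := (pvInv ps).2
  intro hnil
  rw [hnil] at hlen
  simp at hlen
  omega

-- list.insert(0, v) prepends
theorem pvInsertZero (xs : List String) (v : String) :
    PySem.List.insert xs 0 v = v :: xs := by
  simp [PySem.List.insert, PySem.List.sliceIndices]

-- '/'.join on a cons with a nonempty tail, on the char level
theorem pvJoinCons (x y : List Char) (zs : List (List Char)) :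
    List.intercalate ['/'] (x :: y :: zs) = x ++ '/' :: List.intercalate ['/'] (y :: zs) := by
  simp [List.intercalate, List.intersperse]

-- the two tails agree on a nonempty stack
theorem pvTail (h : String) (rest : List String) :
    (let stack := if h ≠ "" then PySem.List.insert (h :: rest) 0 "" else h :: rest
     PySem.Str.join "/" stack) =
    (let pre := if h = "" then "" else "/"
     String.ofList (pre.toList ++ (PySem.Str.join "/" (h :: rest)).toList)) := by
  by_cases hh : h = ""
  · subst hh
    simp [PySem.Str.join]
  · have hins : PySem.List.insert (h :: rest) 0 "" = "" :: h :: rest :=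
      pvInsertZero (h :: rest) ""
    simp only [hh, ne_eq, not_false_iff, if_true]
    rw [hins]
    simp [PySem.Str.join, PySem.Chars.join, pvJoinCons]

-- ===== VERDICT (by name: the statement is the Claim_ definition above) =====
theorem simplify_pathname_spec : Claim_equal_simplify_pathname := by
  intro path_name _ hpre
  unfold Pre_simplify_pathname at hpre
  unfold Spec_simplify_pathname simplify_pathname simplify_pathname_alt
  simp only []
  generalize hq : (PySem.Str.split? (pvCollapse path_name.toList.length path_name) "/").getD []
      = pieces
  rw [hq] at hpre
  have hstacks : pieces.foldl
      (fun (st : List String) piece =>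
        if piece = ".." then (if st.length > 0 then st.dropLast else st)
        else if piece ≠ "." then st ++ [piece] else st) [] = (pvResolve pieces).1 := by
    have h := pvMain pieces []
    rw [pvDropK_nil] at h
    exact h.trans (List.nil_append _)
  rw [hstacks]
  have hne : (pvResolve pieces).1 ≠ [] := pvPre_stack_ne pieces hpre
  obtain ⟨h0, rest, hst⟩ := List.exists_cons_of_ne_nil hne
  rw [hst]
  have hget : PySem.List.pyGet? (h0 :: rest) 0 = some h0 := by
    simp [PySem.List.pyGet?, PySem.List.pyIdx?]
  rw [hget]
  exact pvTail h0 rest
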